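-- pv_equiv track=rewrite | github.com/M1229012/Stock_V116 | main.py | build_exclude_map
-- ===== SOURCE A (Python) =====
-- def build_exclude_map(cal_dates, jail_map):
--     exclude_map = {}
--     if not jail_map:
--         return exclude_map
--
--     for code, periods in jail_map.items():
--         s = set()
--         for start, end in periods:
--             for d in cal_dates:
--                 if start <= d <= end:
--                     s.add(d)
--         exclude_map[code] = s
--     return exclude_map
-- ===== SOURCE B (Python) =====
-- def build_exclude_map(cal_dates, jail_map):
--     # Index each distinct period once: period -> dates of cal_dates inside it (calendar order).
--     covered = {}
--     for periods in jail_map.values():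
--         for p in periods:
--             if p not in covered:
--                 start, end = p
--                 covered[p] = [d for d in cal_dates if start <= d <= end]
--     # Assemble each code's set from the indexed lists.
--     return {code: set(d for p in periods for d in covered[p])
--             for code, periods in jail_map.items()}
-- ===== Notes on version B (the rewrite author's own statement) =====
-- stated objective: alternative
-- what changed: B first builds a period->covered-dates index in one pass over all periods (each distinct period scans cal_dates once), then assembles every code's set by deduplicating the concatenation of indexed lists, instead of A's triple nested loop mutating a set per code.
import Mathlib
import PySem

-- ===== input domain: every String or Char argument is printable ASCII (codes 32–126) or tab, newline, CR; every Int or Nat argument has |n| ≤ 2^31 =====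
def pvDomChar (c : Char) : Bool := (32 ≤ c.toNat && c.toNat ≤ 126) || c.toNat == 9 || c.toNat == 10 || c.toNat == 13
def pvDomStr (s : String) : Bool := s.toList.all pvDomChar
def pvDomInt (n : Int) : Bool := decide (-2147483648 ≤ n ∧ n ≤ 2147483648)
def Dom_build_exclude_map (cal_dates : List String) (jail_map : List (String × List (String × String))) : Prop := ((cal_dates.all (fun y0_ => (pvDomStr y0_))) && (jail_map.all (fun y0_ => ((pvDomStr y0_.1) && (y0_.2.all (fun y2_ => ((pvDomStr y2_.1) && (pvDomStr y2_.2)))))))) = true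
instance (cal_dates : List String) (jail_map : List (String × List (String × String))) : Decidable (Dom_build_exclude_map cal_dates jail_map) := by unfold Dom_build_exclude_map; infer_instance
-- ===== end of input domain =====

-- B replaces A's triple nested loop by a period→covered-dates index built once, then assembles
-- each code's set by deduplicating the concatenation of indexed lists (objective: alternative).

-- ===== PORT A =====
def build_exclude_map (cal_dates : List String) (jail_map : List (String × List (String × String))) : List (String × List String) :=
  let exclude_map : PySem.Dict String (List String) := PySem.Dict.empty
  if jail_map = [] then exclude_map.items
  else
    (jail_map.foldl (fun em cp =>
      let s : PySem.Set String :=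
        cp.2.foldl (fun s pe =>
          cal_dates.foldl (fun s d =>
            if pe.1 ≤ d ∧ d ≤ pe.2 then PySem.Set.add s d else s) s) PySem.Set.empty
      em.insert cp.1 s) exclude_map).items

-- ===== PORT B =====
def build_exclude_map_alt (cal_dates : List String) (jail_map : List (String × List (String × String))) : List (String × List String) :=
  let covered : PySem.Dict (String × String) (List String) :=
    jail_map.foldl (fun cov cp =>
      cp.2.foldl (fun cov p =>
        if cov.contains p then cov
        else cov.insert p (cal_dates.filter (fun d => decide (p.1 ≤ d ∧ d ≤ p.2)))) cov)
      PySem.Dict.empty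
  (jail_map.foldl (fun res cp =>
    res.insert cp.1 (PySem.Set.ofList (cp.2.flatMap (fun p => covered.getD p []))))
    PySem.Dict.empty).items

-- ===== PRECONDITION & SPEC =====
def Spec_build_exclude_map (cal_dates : List String) (jail_map : List (String × List (String × String))) (out : List (String × List String)) : Prop := out = build_exclude_map_alt cal_dates jail_map
instance (cal_dates : List String) (jail_map : List (String × List (String × String))) (out : List (String × List String)) : Decidable (Spec_build_exclude_map cal_dates jail_map out) := by unfold Spec_build_exclude_map; infer_instance

-- ===== CLAIM (what is proved, stated in full; the proofs are below) =====
def Claim_equal_build_exclude_map : Prop := ∀ (cal_dates : List String) (jail_map : List (String × List (String × String))), Dom_build_exclude_map cal_dates jail_map → Spec_build_exclude_map cal_dates jail_map (build_exclude_map cal_dates jail_map)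

-- ===== LEMMAS AND PROOFS =====

-- the list of cal_dates covered by period p, in calendar order
def pvF (cal : List String) (p : String × String) : List String :=
  cal.filter (fun d => decide (p.1 ≤ d ∧ d ≤ p.2))

-- one memoization step of B's index-building loop
def pvIns (cal : List String) (cov : PySem.Dict (String × String) (List String))
    (p : String × String) : PySem.Dict (String × String) (List String) :=
  if cov.contains p then cov else cov.insert p (pvF cal p)

def pvMemoStep (cal : List String) (cov : PySem.Dict (String × String) (List String))
    (cp : String × List (String × String)) : PySem.Dict (String × String) (List String) :=
  cp.2.foldl (pvIns cal) cov

-- every value stored in the memo is the covered-dates list of its key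
def pvGood (cal : List String) (cov : PySem.Dict (String × String) (List String)) : Prop :=
  ∀ q v, cov.get? q = some v → v = pvF cal q

lemma pvGood_ins (cal : List String) (cov : PySem.Dict (String × String) (List String))
    (p : String × String) (h : pvGood cal cov) : pvGood cal (pvIns cal cov p) := by
  unfold pvIns
  split
  · exact h
  · intro q v hq
    rw [PySem.Dict.get?_insert] at hq
    split at hq
    · cases hq; subst q; rfl
    · exact h q v hq

lemma pvGood_foldl_ins (cal : List String) (l : List (String × String))
    (cov : PySem.Dict (String × String) (List String)) (h : pvGood cal cov) :
    pvGood cal (l.foldl (pvIns cal) cov) := by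
  induction l generalizing cov with
  | nil => exact h
  | cons a t ih => exact ih _ (pvGood_ins cal cov a h)

lemma pvGood_foldl_step (cal : List String) (l : List (String × List (String × String)))
    (cov : PySem.Dict (String × String) (List String)) (h : pvGood cal cov) :
    pvGood cal (l.foldl (pvMemoStep cal) cov) := by
  induction l generalizing cov with
  | nil => exact h
  | cons a t ih => exact ih _ (pvGood_foldl_ins cal a.2 cov h)

lemma pvContains_ins_mono (cal : List String) (cov : PySem.Dict (String × String) (List String))
    (p q : String × String) (h : cov.contains q = true) : (pvIns cal cov p).contains q = true := by
  unfold pvIns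
  split
  · exact h
  · simp [PySem.Dict.contains_insert, h]

lemma pvContains_ins_self (cal : List String) (cov : PySem.Dict (String × String) (List String))
    (p : String × String) : (pvIns cal cov p).contains p = true := by
  unfold pvIns
  split
  · assumption
  · exact PySem.Dict.contains_insert_self _ _ _

lemma pvContains_foldl_ins_mono (cal : List String) (l : List (String × String))
    (cov : PySem.Dict (String × String) (List String)) (q : String × String)
    (h : cov.contains q = true) : (l.foldl (pvIns cal) cov).contains q = true := by
  induction l generalizing cov with
  | nil => exact h
  | cons a t ih => exact ih _ (pvContains_ins_mono cal cov a q h)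

lemma pvContains_foldl_ins_mem (cal : List String) (l : List (String × String))
    (q : String × String) :
    ∀ (cov : PySem.Dict (String × String) (List String)), q ∈ l →
      (l.foldl (pvIns cal) cov).contains q = true := by
  induction l with
  | nil => intro _ h; cases h
  | cons a t ih =>
    intro cov h
    rcases List.mem_cons.mp h with rfl | hm
    · exact pvContains_foldl_ins_mono cal t _ q (pvContains_ins_self cal cov q)
    · exact ih _ hm

lemma pvContains_foldl_step_mono (cal : List String) (l : List (String × List (String × String)))
    (cov : PySem.Dict (String × String) (List String)) (q : String × String)
    (h : cov.contains q = true) : (l.foldl (pvMemoStep cal) cov).contains q = true := by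
  induction l generalizing cov with
  | nil => exact h
  | cons a t ih => exact ih _ (pvContains_foldl_ins_mono cal a.2 cov q h)

lemma pvContains_covered (cal : List String) (jm : List (String × List (String × String)))
    (cp : String × List (String × String)) (p : String × String)
    (hcp : cp ∈ jm) (hp : p ∈ cp.2) :
    ((jm.foldl (pvMemoStep cal) PySem.Dict.empty).contains p) = true := by
  suffices h : ∀ (l : List (String × List (String × String)))
      (cov : PySem.Dict (String × String) (List String)), cp ∈ l →
      (l.foldl (pvMemoStep cal) cov).contains p = true from h jm _ hcp
  intro l
  induction l with
  | nil => intro _ h; cases h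
  | cons a t ih =>
    intro cov hm
    rcases List.mem_cons.mp hm with rfl | hm'
    · exact pvContains_foldl_step_mono cal t _ p (pvContains_foldl_ins_mem cal cp.2 p cov hp)
    · exact ih _ hm'

lemma pvGetD_covered (cal : List String) (jm : List (String × List (String × String)))
    (cp : String × List (String × String)) (p : String × String)
    (hcp : cp ∈ jm) (hp : p ∈ cp.2) :
    (jm.foldl (pvMemoStep cal) PySem.Dict.empty).getD p [] = pvF cal p := by
  have hc := pvContains_covered cal jm cp p hcp hp
  have hgood : pvGood cal (jm.foldl (pvMemoStep cal) PySem.Dict.empty) := by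
    apply pvGood_foldl_step
    intro q v hq
    simp [PySem.Dict.get?_empty] at hq
  rw [PySem.Dict.contains_eq_isSome_get?] at hc
  rcases Option.isSome_iff_exists.mp hc with ⟨v, hv⟩
  rw [PySem.Dict.getD_eq_get?_getD, hv]
  simpa using hgood p v hv

lemma pvFoldl_update_flatMap {α β : Type} [BEq α] (g : β → List α) (l : List β)
    (s : PySem.Set α) :
    l.foldl (fun s pe => PySem.Set.update s (g pe)) s = PySem.Set.update s (l.flatMap g) := by
  induction l generalizing s with
  | nil => simp [PySem.Set.update]
  | cons a t ih =>
    rw [List.foldl_cons, ih, List.flatMap_cons, PySem.Set.update_append]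

-- A's per-code set is the ordered dedup of the concatenated covered-dates lists
lemma pvAval (cal : List String) (periods : List (String × String)) :
    periods.foldl (fun s pe =>
      cal.foldl (fun s d =>
        if pe.1 ≤ d ∧ d ≤ pe.2 then PySem.Set.add s d else s) s) PySem.Set.empty
    = PySem.Set.ofList (periods.flatMap (pvF cal)) := by
  have h1 : ∀ (pe : String × String) (s : PySem.Set String),
      cal.foldl (fun s d => if pe.1 ≤ d ∧ d ≤ pe.2 then PySem.Set.add s d else s) s
      = PySem.Set.update s (pvF cal pe) := by
    intro pe s
    rw [PySem.List.foldl_ite_eq_foldl_filter]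
    rfl
  calc periods.foldl (fun s pe =>
          cal.foldl (fun s d => if pe.1 ≤ d ∧ d ≤ pe.2 then PySem.Set.add s d else s) s)
          PySem.Set.empty
      = periods.foldl (fun s pe => PySem.Set.update s (pvF cal pe)) PySem.Set.empty :=
        PySem.List.foldl_congr_mem _ _ _ _ (fun s pe _ => h1 pe s)
    _ = PySem.Set.update PySem.Set.empty (periods.flatMap (pvF cal)) :=
        pvFoldl_update_flatMap _ _ _
    _ = PySem.Set.ofList (periods.flatMap (pvF cal)) := rfl

lemma pvFlatMap_congr {α β : Type} (f g : α → List β) (l : List α)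
    (h : ∀ a ∈ l, f a = g a) : l.flatMap f = l.flatMap g := by
  induction l with
  | nil => rfl
  | cons a t ih =>
    rw [List.flatMap_cons, List.flatMap_cons, h a (List.mem_cons_self), ih]
    intro a ha; exact h a (List.mem_cons_of_mem _ ha)

-- ===== VERDICT (by name: the statement is the Claim_ definition above) =====
theorem build_exclude_map_spec : Claim_equal_build_exclude_map := by
  intro cal jm _
  unfold Spec_build_exclude_map build_exclude_map build_exclude_map_alt
  by_cases hjm : jm = []
  · subst hjm; rfl
  · rw [if_neg hjm]
    congr 1
    apply PySem.List.foldl_congr_mem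
    intro acc cp hcp
    show acc.insert cp.1
        (cp.2.foldl (fun s pe =>
          cal.foldl (fun s d => if pe.1 ≤ d ∧ d ≤ pe.2 then PySem.Set.add s d else s) s)
          PySem.Set.empty)
      = acc.insert cp.1 (PySem.Set.ofList (cp.2.flatMap (fun p =>
          (jm.foldl (pvMemoStep cal) PySem.Dict.empty).getD p [])))
    rw [pvAval]
    exact congrArg (fun l => acc.insert cp.1 (PySem.Set.ofList l))
      (pvFlatMap_congr _ _ _ (fun p hp => (pvGetD_covered cal jm cp p hcp hp).symm))
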